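-- pv_equiv track=rewrite | github.com/deepbeepmeep/Wan2GP | source/task_handlers/travel/orchestrator.py | _calculate_segment_stitched_offsets
-- ===== SOURCE A (Python) =====
-- def _calculate_segment_stitched_offsets(
--     segment_frames_expanded: list[int],
--     frame_overlap_expanded: list[int],
-- ) -> tuple[list[int], int]:
--     """Return stitched segment start offsets and total stitched frame count."""
--     total_stitched_frames = 0
--     segment_stitched_offsets: list[int] = []
--
--     for idx, segment_total_frames in enumerate(segment_frames_expanded):
--         if idx == 0:
--             segment_stitched_offsets.append(0)
--             total_stitched_frames = segment_total_frames
--         else: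
--             overlap = frame_overlap_expanded[idx - 1] if idx - 1 < len(frame_overlap_expanded) else 0
--             segment_start = total_stitched_frames - overlap
--             segment_stitched_offsets.append(segment_start)
--             total_stitched_frames = segment_start + segment_total_frames
--
--     return segment_stitched_offsets, total_stitched_frames
-- ===== SOURCE B (Python) =====
-- def _calculate_segment_stitched_offsets(
--     segment_frames_expanded: list[int],
--     frame_overlap_expanded: list[int],
-- ) -> tuple[list[int], int]:
--     """Closed-form version: offset[i] is the prefix sum of segment lengths
--     minus the prefix sum of the (clamped) overlaps; total = last offset + last segment."""
--     n = len(segment_frames_expanded)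
--     if n == 0:
--         return [], 0
--     # prefix sums of segment lengths: ps[i] = sum(segment_frames_expanded[:i])
--     ps = [0]
--     t = 0
--     for s in segment_frames_expanded:
--         t += s
--         ps.append(t)
--     # prefix sums of overlaps: po[k] = sum(frame_overlap_expanded[:k])
--     po = [0]
--     t = 0
--     for o in frame_overlap_expanded:
--         t += o
--         po.append(t)
--     m = len(frame_overlap_expanded)
--     offsets = [ps[i] - po[min(i, m)] for i in range(n)]
--     return offsets, offsets[-1] + segment_frames_expanded[-1]
-- ===== Notes on version B (the rewrite author's own statement) =====
-- stated objective: alternative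
-- what changed: Replaces A's interleaved running-total loop (carrying total_stitched_frames through each iteration) by a closed-form per-index formula: two prefix-sum arrays (segments and overlaps) built once, then offset[i] = prefix_seg[i] - prefix_ov[min(i, len(overlaps))] and total = last offset + last segment.
import Mathlib
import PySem

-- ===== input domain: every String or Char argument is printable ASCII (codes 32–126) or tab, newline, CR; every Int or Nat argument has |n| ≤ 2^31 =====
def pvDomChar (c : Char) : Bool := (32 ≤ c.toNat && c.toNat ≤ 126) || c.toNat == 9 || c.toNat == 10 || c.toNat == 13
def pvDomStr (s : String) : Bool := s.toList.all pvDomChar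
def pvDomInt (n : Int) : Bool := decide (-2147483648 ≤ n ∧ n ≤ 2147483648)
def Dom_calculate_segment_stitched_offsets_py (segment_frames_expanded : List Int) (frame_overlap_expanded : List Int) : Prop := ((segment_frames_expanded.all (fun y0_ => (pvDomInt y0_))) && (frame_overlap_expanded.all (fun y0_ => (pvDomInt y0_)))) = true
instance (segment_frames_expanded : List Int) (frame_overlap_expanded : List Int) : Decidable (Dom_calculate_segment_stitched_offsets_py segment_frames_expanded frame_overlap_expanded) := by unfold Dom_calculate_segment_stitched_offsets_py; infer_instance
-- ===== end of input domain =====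

-- B replaces A's interleaved running-total loop by a closed-form per-index formula over two
-- prefix-sum arrays (objective: alternative decomposition, same cost).

-- ===== PORT A =====
-- literal transliteration of A's loop: fold over enumerate, state = (total_stitched_frames, offsets)
def calculate_segment_stitched_offsets_py (segment_frames_expanded : List Int) (frame_overlap_expanded : List Int) : List Int × Int :=
  let st := (PySem.List.enumerate segment_frames_expanded).foldl
    (fun (st : Int × List Int) (p : Int × Int) =>
      if p.1 == 0 then
        (p.2, st.2 ++ [0])
      else
        -- frame_overlap_expanded[idx-1] is guarded in range (idx ≥ 1), so pyGetD is exact here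
        let overlap := if p.1 - 1 < (frame_overlap_expanded.length : Int) then PySem.List.pyGetD frame_overlap_expanded (p.1 - 1) 0 else 0
        let segment_start := st.1 - overlap
        (segment_start + p.2, st.2 ++ [segment_start]))
    (0, [])
  (st.2, st.1)

-- ===== PORT B =====
-- B's prefix-sum helper: ps = [0]; t = 0; for x in xs: t += x; ps.append(t)
def pvPrefixSums (xs : List Int) : List Int :=
  (xs.foldl (fun (st : List Int × Int) x => (st.1 ++ [st.2 + x], st.2 + x)) ([0], 0)).1

-- literal transliteration of Source B; loop indices i and min(i,m) are nonnegative and in range,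
-- so List.range / getD / getLastD are exact for range(n), ps[i], po[...], offsets[-1], seg[-1]
def calculate_segment_stitched_offsets_py_alt (segment_frames_expanded : List Int) (frame_overlap_expanded : List Int) : List Int × Int :=
  let n := segment_frames_expanded.length
  if n == 0 then ([], 0)
  else
    let ps := pvPrefixSums segment_frames_expanded
    let po := pvPrefixSums frame_overlap_expanded
    let m := frame_overlap_expanded.length
    let offsets := (List.range n).map (fun i => ps.getD i 0 - po.getD (min i m) 0)
    (offsets, offsets.getLastD 0 + segment_frames_expanded.getLastD 0)

-- ===== PRECONDITION & SPEC =====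
def Spec_calculate_segment_stitched_offsets_py (segment_frames_expanded : List Int) (frame_overlap_expanded : List Int) (out : List Int × Int) : Prop := out = calculate_segment_stitched_offsets_py_alt segment_frames_expanded frame_overlap_expanded
instance (segment_frames_expanded : List Int) (frame_overlap_expanded : List Int) (out : List Int × Int) : Decidable (Spec_calculate_segment_stitched_offsets_py segment_frames_expanded frame_overlap_expanded out) := by unfold Spec_calculate_segment_stitched_offsets_py; infer_instance

-- ===== CLAIM (what is proved, stated in full; the proofs are below) =====
def Claim_equal_calculate_segment_stitched_offsets_py : Prop := ∀ (segment_frames_expanded : List Int) (frame_overlap_expanded : List Int), Dom_calculate_segment_stitched_offsets_py segment_frames_expanded frame_overlap_expanded → Spec_calculate_segment_stitched_offsets_py segment_frames_expanded frame_overlap_expanded (calculate_segment_stitched_offsets_py segment_frames_expanded frame_overlap_expanded)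

-- ===== LEMMAS AND PROOFS =====

-- characterisation of B's prefix-sum loop
lemma pvPrefixSums_foldl (xs : List Int) : ∀ (acc : List Int) (t : Int),
    xs.foldl (fun (st : List Int × Int) x => (st.1 ++ [st.2 + x], st.2 + x)) (acc, t)
      = (acc ++ (List.range xs.length).map (fun i => t + (xs.take (i+1)).sum), t + xs.sum) := by
  induction xs with
  | nil => intro acc t; simp
  | cons x rest ih =>
    intro acc t
    simp only [List.foldl_cons, ih (acc ++ [t + x]) (t + x)]
    refine Prod.ext ?_ (by simp; ring)
    show acc ++ [t + x] ++ _ = acc ++ _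
    rw [List.append_assoc]
    congr 1
    simp only [List.length_cons]
    rw [List.range_succ_eq_map]
    simp only [List.map_cons, List.map_map, Function.comp_def, List.take_succ_cons,
      List.sum_cons, List.take_zero, List.sum_nil, List.cons_append, List.nil_append, add_zero]
    exact congrArg _ (List.map_congr_left (fun i _ => by ring))

lemma pvPrefixSums_eq (xs : List Int) :
    pvPrefixSums xs = 0 :: (List.range xs.length).map (fun i => (xs.take (i+1)).sum) := by
  simp [pvPrefixSums, pvPrefixSums_foldl xs [0] 0]

-- getD on the prefix-sum list
lemma pvPrefixSums_getD (xs : List Int) (t : Nat) (ht : t ≤ xs.length) :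
    (pvPrefixSums xs).getD t 0 = (xs.take t).sum := by
  rw [pvPrefixSums_eq]
  cases t with
  | zero => simp
  | succ u =>
    have hu : u < xs.length := by omega
    simp [List.getD, hu]

-- the overlap sum splits one element at a time, whether or not k is in range
lemma drop_take_succ_sum (ov : List Int) (k L : Nat) :
    ((ov.drop k).take (L+1)).sum = ov.getD k 0 + ((ov.drop (k+1)).take L).sum := by
  by_cases hk : k < ov.length
  · have : ov.drop k = ov[k] :: ov.drop (k+1) := by
      rw [List.drop_eq_getElem_cons hk]
    rw [this, List.take_succ_cons, List.sum_cons, List.getD_eq_getElem ov 0 hk]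
  · have h1 : ov.drop k = [] := List.drop_eq_nil_of_le (by omega)
    have h2 : ov.drop (k+1) = [] := List.drop_eq_nil_of_le (by omega)
    simp [h1, h2, List.getD, List.getElem?_eq_none (show ov.length ≤ k by omega)]

-- A's loop from index k+1 onward, in closed form
lemma loopA (ov : List Int) : ∀ (rest : List Int) (k : Nat) (total : Int) (acc : List Int),
    (PySem.List.enumerate rest ((k : Int)+1)).foldl
      (fun (st : Int × List Int) (p : Int × Int) =>
        if p.1 == 0 then
          (p.2, st.2 ++ [0])
        else
          let overlap := if p.1 - 1 < (ov.length : Int) then PySem.List.pyGetD ov (p.1 - 1) 0 else 0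
          let segment_start := st.1 - overlap
          (segment_start + p.2, st.2 ++ [segment_start]))
      (total, acc)
    = (total + rest.sum - ((ov.drop k).take rest.length).sum,
       acc ++ (List.range rest.length).map
         (fun j => total + (rest.take j).sum - ((ov.drop k).take (j+1)).sum)) := by
  intro rest
  induction rest with
  | nil => intro k total acc; simp [PySem.List.enumerate]
  | cons r rs ih =>
    intro k total acc
    rw [PySem.List.enumerate_cons]
    simp only [List.foldl_cons]
    have hne : (((k : Int) + 1) == 0) = false := by simp; omega
    have hidx : ((k : Int) + 1) - 1 = (k : Int) := by ring
    have hov : (if ((k : Int) + 1) - 1 < (ov.length : Int) then PySem.List.pyGetD ov (((k : Int) + 1) - 1) 0 else 0) = ov.getD k 0 := by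
      rw [hidx]
      by_cases hk : k < ov.length
      · simp [hk]
      · rw [if_neg (by exact_mod_cast hk), List.getD_eq_default ov 0 (by omega)]
    simp only [hne, Bool.false_eq_true, if_false, hov]
    have hcast : (k : Int) + 1 + 1 = ((k + 1 : Nat) : Int) + 1 := by push_cast; ring
    rw [hcast, ih (k + 1)]
    refine Prod.ext ?_ ?_
    · show total - ov.getD k 0 + r + rs.sum - _ = total + (r :: rs).sum - _
      simp only [List.length_cons, List.sum_cons, drop_take_succ_sum ov k rs.length]
      ring
    · show acc ++ [total - ov.getD k 0] ++ _ = acc ++ _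
      simp only [List.length_cons]
      rw [List.append_assoc, List.range_succ_eq_map]
      congr 1
      simp only [List.map_cons, List.map_map, Function.comp_def, List.take_succ_cons,
        List.sum_cons, List.take_zero, List.sum_nil, add_zero, List.cons_append, List.nil_append]
      rw [show ((ov.drop k).take (0 + 1)).sum = ov.getD k 0 by simpa using drop_take_succ_sum ov k 0]
      refine congrArg₂ _ (by ring) ?_
      exact List.map_congr_left (fun j _ => by
        rw [drop_take_succ_sum ov k (j + 1)]; ring)

-- a nonempty list's sum is the sum of all but the last element plus the last element
lemma sum_take_pred_add_getLastD (xs : List Int) (h : xs ≠ []) :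
    (xs.take (xs.length - 1)).sum + xs.getLastD 0 = xs.sum := by
  rw [← List.dropLast_eq_take]
  conv_rhs => rw [← List.dropLast_append_getLast h]
  rw [List.sum_append]
  simp [List.getLastD_eq_getLast?, List.getLast?_eq_getLast_of_ne_nil h]

-- ===== VERDICT (by name: the statement is the Claim_ definition above) =====
theorem calculate_segment_stitched_offsets_py_spec : Claim_equal_calculate_segment_stitched_offsets_py := by
  intro seg ov _
  unfold Spec_calculate_segment_stitched_offsets_py
  cases seg with
  | nil =>
    simp [calculate_segment_stitched_offsets_py, calculate_segment_stitched_offsets_py_alt,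
      PySem.List.enumerate]
  | cons s rest =>
    -- the closed form both sides reach
    set F : Nat → Int := fun i => ((s :: rest).take i).sum - (ov.take i).sum with hF
    have hA : calculate_segment_stitched_offsets_py (s :: rest) ov =
        ((List.range (rest.length + 1)).map F, s + rest.sum - (ov.take rest.length).sum) := by
      unfold calculate_segment_stitched_offsets_py
      rw [PySem.List.enumerate_cons]
      simp only [List.foldl_cons, if_pos (by rfl : ((0 : Int) == 0) = true)]
      rw [show (0 : Int) + 1 = ((0 : Nat) : Int) + 1 by norm_num, loopA ov rest 0 s ([] ++ [0])]
      simp only [List.drop_zero, List.nil_append]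
      refine Prod.ext ?_ rfl
      show [0] ++ _ = _
      rw [List.range_succ_eq_map]
      simp only [hF, List.map_cons, List.map_map, Function.comp_def, List.take_succ_cons,
        List.sum_cons, List.take_zero, List.sum_nil, List.cons_append, List.nil_append, sub_zero]
    have hoff : ∀ i ∈ List.range (rest.length + 1),
        (pvPrefixSums (s :: rest)).getD i 0 - (pvPrefixSums ov).getD (min i ov.length) 0 = F i := by
      intro i hi
      rw [List.mem_range] at hi
      rw [pvPrefixSums_getD (s :: rest) i (by simp; omega),
        pvPrefixSums_getD ov _ (min_le_right _ _), ← List.take_eq_take_min]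
    have hB : calculate_segment_stitched_offsets_py_alt (s :: rest) ov =
        ((List.range (rest.length + 1)).map F,
         ((List.range (rest.length + 1)).map F).getLastD 0 + (s :: rest).getLastD 0) := by
      unfold calculate_segment_stitched_offsets_py_alt
      simp only [List.length_cons]
      rw [if_neg (by simp), List.map_congr_left hoff]
    rw [hA, hB]
    refine Prod.ext rfl ?_
    show s + rest.sum - (ov.take rest.length).sum = _
    rw [List.range_succ, List.map_append, List.map_cons, List.map_nil, List.getLastD_concat]
    have hlast := sum_take_pred_add_getLastD (s :: rest) (by simp)
    simp only [List.length_cons, Nat.add_sub_cancel] at hlast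
    simp only [hF]
    rw [show ((s :: rest).take rest.length).sum = (s :: rest).sum - (s :: rest).getLastD 0 by
      rw [← hlast]; ring]
    simp only [List.sum_cons]
    ring
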